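/-
  THE SEGMENTS OF `digest_extensions` (gif_driver.c:130-145; 53 instructions at 105660H; NO protected frame: six pushes and
  `sub rsp, 8`; contract: Gif/Spec/Driver.lean `digest_extensions.spec`; design/units/digest_extensions.tsv).

      unit  from      to (exits)               what it walks
      1     105660H   10568DH | 1056F0H        the six pushes, `sub rsp, 8`, `r14d = count`, `r15 = blocks`; `digest_int(h, count)` (l.132);
                                               `blocks == NULL` (l.133): to the exit; otherwise `r12d = i = 0`, to the loop head
                                                                                                                        (15 instructions)
      2     10568DH   10568DH | 1056F0H        ONE ROUND of the block loop (l.136-142): the test `i < count` (`cmp r12d, r14d ; jge`);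
                                               false: to the exit; `rbp = &blocks[i]`; the checked loads of `Function` (`+ 16`),
                                               `ByteCount` (`+ 0`, kept in `r13d`), each with its `digest_int`; the checked 8-byte load
                                               of `Bytes` (`+ 8`); not NULL: `digest_bytes(h, Bytes, (unsigned long) ByteCount)`; `i++`;
                                               back to the head with a smaller measure                                  (29 instructions)
      E     1056F0H   ret                      the shared exit: `rax = rbx`, `add rsp, 8`, six pops, `ret`              (9 instructions)
      COMPOSITION                              `compose`, proved below: the loop by strong induction on the measure `count − i`

  THE MEMORY DOES NOT CHANGE outside the function's 128 bytes of stack. The digest value (`rbx`) is never constrained.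
  The ghost list is called `ex` here (`e` is the entry state).
-/
import Gif.Spec.Driver
import Gif.LabelsAt
namespace Gif.Spec
open X86 X86.User Asan ProgX.Base ProgX.Base.Spec

namespace digest_extensions

/-- **INSIDE `digest_extensions`**, at the address `cut`, inside the call that was entered at the state `e` (return address `ret`)
with the function's precondition for the list `ex`. Six registers saved (`r15 r14 r13 r12 rbp rbx` in push order: every callee-saved
register), `rsp = RA − 56`; no protected frame: the active frames are the entry's; the heap's invariant holds for the entry's heap
with the clean stack ending at the present stack pointer; no shadow byte was written; nothing was written but the function's 128 bytes
of stack. What the six registers hold is said by the assertion of each cut. -/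
structure At (cut : Word) (H : Heap) (rest : List Obj) (frames : List (Nat × FrameLayout)) (ex : Option Exts) (u₀ e : State)
    (ret : Word) (v : State) : Prop where
  /-- the function was entered at `e` … -/
  entry : AtEntry (conv u₀) Gif.L.digest_extensions.entry (digest_extensions.spec H rest frames ex).frame ret e
  /-- … with its precondition: `HeapPre H rest frames e`, `ExtsAt ex rdx (esi) e.mem`, `Owns H (Exts.objs ex)` -/
  pre : (digest_extensions.spec H rest frames ex).pre e
  rip : v.rip = cut
  /-- six pushes and `sub rsp, 8` below the return address -/
  rsp : v.reg .rsp = e.reg .rsp - 56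
  /-- the saved registers, in push order: the six pops at 1056F7H … 1056FFH (segment E) read them -/
  slot_r15 : v.mem.readLE (e.reg .rsp - 8) 8 = (e.reg .r15).toNat
  slot_r14 : v.mem.readLE (e.reg .rsp - 16) 8 = (e.reg .r14).toNat
  slot_r13 : v.mem.readLE (e.reg .rsp - 24) 8 = (e.reg .r13).toNat
  slot_r12 : v.mem.readLE (e.reg .rsp - 32) 8 = (e.reg .r12).toNat
  slot_rbp : v.mem.readLE (e.reg .rsp - 40) 8 = (e.reg .rbp).toNat
  slot_rbx : v.mem.readLE (e.reg .rsp - 48) 8 = (e.reg .rbx).toNat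
  /-- the return address is still in its slot: the `ret` at 105701H (segment E) pops it -/
  slot_ra : UInt64.ofNat (v.mem.readLE (e.reg .rsp) 8) = ret
  /-- the heap's invariant for the entry's heap and frames, the clean stack ending at the present stack pointer -/
  inv : HeapInv H rest frames ((e.reg .rsp).toNat - 56) v.mem
  /-- no shadow byte was written (the contract's post) -/
  un : ShadowUntouched e.mem v.mem
  /-- nothing was written but the function's stack (the contract's 128 bytes) -/
  same : Mem.SameExcept
    [⟨(e.reg .rsp).toNat - 128, (e.reg .rsp).toNat⟩] e.mem v.mem
  code : (conv u₀).code.In v.mem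
  abi : (conv u₀).inv v

/-- **THE HEAD OF THE BLOCK LOOP** (l.136, at 10568DH `cmp r12d, r14d`), THE LOOP INVARIANT with the measure `k`: the pointer is not
NULL: `ex = some x`; `r15 = blocks = x.arr`; the counted blocks agree IN THE PRESENT MEMORY (`ExtsAt`: `ByteCount = len ≤ 255`,
`Bytes = bytes` of every block `i < length`; `length ≤ cap`); `r14 = count = length` (`mov r14d, esi`: zero-extended), `r12 = i ≤
length` (a zero-extended 32-bit counter), `length − i = k`. `rbx = h`: any value. `rbp r13` are dead (set inside the round). The array
and the bytes of every block are owned: `pre` (`Owns H (Exts.objs ex)`). -/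
structure Head (k : Nat) (H : Heap) (rest : List Obj) (frames : List (Nat × FrameLayout)) (ex : Option Exts) (u₀ e : State)
    (ret : Word) (v : State) : Prop where
  at_ : At Gif.L.digest_extensions.at_10568d H rest frames ex u₀ e ret v
  /-- the list, its counted blocks in the present memory, the count, the counter, the measure -/
  loop : ∃ x : Exts, ex = some x ∧ (v.reg .r15).toNat = x.arr ∧ ExtsAt (some x) x.arr x.blocks.length v.mem ∧
    (v.reg .r14).toNat = x.blocks.length ∧ (v.reg .r12).toNat ≤ x.blocks.length ∧
    x.blocks.length - (v.reg .r12).toNat = k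

/-- **AT THE SHARED EXIT** (at 1056F0H `mov rax, rbx`): `At`; the result is in `rbx` (any value: the post says nothing of it). -/
structure Done (H : Heap) (rest : List Obj) (frames : List (Nat × FrameLayout)) (ex : Option Exts) (u₀ e : State)
    (ret : Word) (v : State) : Prop where
  at_ : At Gif.L.digest_extensions.at_1056f0 H rest frames ex u₀ e ret v

/-- **Segment 1** (15 instructions; 105660H … 105689H): the six pushes, `sub rsp, 8`, `mov r14d, esi`, `mov r15, rdx`;
`digest_int(h, count)` (`rdi`, `esi` still the arguments), `rbx = rax`; `test r15, r15`. NULL (`ex = none` by `ExtsAt`, or walked as it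
is): to the exit. Otherwise `ex = some x` (`ExtsAt none` says the pointer is 0), `r12d = 0`, to the head with the measure `length`.
`digest_int` writes 16 bytes of stack below the function's own 56 + 8: inside the contract's 128; the array is a heap object, off the
stack: `ExtsAt.frame`. -/
def Seg1 (Lay : Layout) (μ : Microarch) (u₀ : State) : Prop :=
  ∀ (H : Heap) (rest : List Obj) (frames : List (Nat × FrameLayout)) (ex : Option Exts) (e : State) (ret : Word),
    AtEntry (conv u₀) Gif.L.digest_extensions.entry (digest_extensions.spec H rest frames ex).frame ret e →
    (digest_extensions.spec H rest frames ex).pre e →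
    ReachVia Lay μ WayInv e (fun w =>
      (∃ k : Nat, Head k H rest frames ex u₀ e ret w) ∨
      Done H rest frames ex u₀ e ret w)

/-- **Segment 2** (29 instructions; 10568DH … 1056F0H, 105689H … 10568DH): ONE ROUND. `cmp r12d, r14d ; jge` (signed: `length ≤ cap`
and the array of `24 · cap` bytes lies in the 4 MB heap: `Owns.inside`): `i ≥ count`: to the exit. Otherwise `i < length`:
`rbp = x.arr + 24·i` (`movsxd ; lea [rax+rax*2] ; lea [r15+rax*8]`); the checked 4-byte loads of `Function` (`rbp + 16`) and
`ByteCount` (`rbp + 0`: `r13d = x.blocks[i].len`) — inside the live array `(x.arr, 24 · x.cap)` —, each with `digest_int`; the checked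
8-byte load of `Bytes` (`rbp + 8`: `= x.blocks[i].bytes`); NULL (design F-2, X3): nothing; otherwise `rdx = (long) r13d = len` (1 …
255: the sign extension changes nothing), `digest_bytes(h, bytes, len)`: the `len` bytes are the live object `(bytes, len)`
(`Blk.objs`, a member of `Exts.objs ex`: `Owns.liveIn`); `add r12d, 1`; back to the head with the measure `k − 1`. The callees write
stack only (`digest_bytes`: 64 bytes below the own 56 + 8). -/
def Seg2 (Lay : Layout) (μ : Microarch) (u₀ : State) : Prop :=
  ∀ (H : Heap) (rest : List Obj) (frames : List (Nat × FrameLayout)) (ex : Option Exts) (e : State) (ret : Word) (k : Nat)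
    (v : State),
    Head k H rest frames ex u₀ e ret v →
    ReachVia Lay μ WayInv v (fun w =>
      (∃ k' : Nat, k' < k ∧ Head k' H rest frames ex u₀ e ret w) ∨
      Done H rest frames ex u₀ e ret w)

/-- **Segment E** (the shared exit, 9 instructions; 1056F0H … 105702H): `mov rax, rbx`, `add rsp, 8`, six pops, `ret`: the contract's
`Returned` (`post` = `ShadowUntouched`: `At.un`; `same`: `At.same`). -/
def SegE (Lay : Layout) (μ : Microarch) (u₀ : State) : Prop :=
  ∀ (H : Heap) (rest : List Obj) (frames : List (Nat × FrameLayout)) (ex : Option Exts) (e : State) (ret : Word) (v : State),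
    Done H rest frames ex u₀ e ret v →
    ReachVia Lay μ WayInv v (Returned (conv u₀) (digest_extensions.spec H rest frames ex) e ret)

/-- **THE BLOCK LOOP**, from its head with the measure `k`: by strong induction on `k`. A round is segment 2 (to the exit, or back to
the head with a smaller measure). -/
theorem fromHead {Lay : Layout} {μ : Microarch} {u₀ : State} (h2 : Seg2 Lay μ u₀) (hE : SegE Lay μ u₀)
    (H : Heap) (rest : List Obj) (frames : List (Nat × FrameLayout)) (ex : Option Exts) (e : State) (ret : Word) :
    ∀ (k : Nat) (v : State),
      Head k H rest frames ex u₀ e ret v →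
      ReachVia Lay μ WayInv v (Returned (conv u₀) (digest_extensions.spec H rest frames ex) e ret) := by
  intro k
  induction k using Nat.strongRecOn with
  | _ k ih =>
    intro v hv
    refine (h2 H rest frames ex e ret k v hv).trans ?_
    intro w hw
    rcases hw with hh | hd
    · obtain ⟨k', hlt, hh'⟩ := hh
      exact ih k' hlt w hh'
    · exact hE H rest frames ex e ret w hd

/-- **The composition of `digest_extensions`**: the three segments chain into the function's contract. -/
theorem compose {Lay : Layout} {μ : Microarch} {u₀ : State} (h1 : Seg1 Lay μ u₀) (h2 : Seg2 Lay μ u₀) (hE : SegE Lay μ u₀) :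
    ∀ (H : Heap) (rest : List Obj) (frames : List (Nat × FrameLayout)) (ex : Option Exts),
      Calls Lay μ WayInv (conv u₀) Gif.L.digest_extensions.entry (digest_extensions.spec H rest frames ex) := by
  intro H rest frames ex e ret he hp
  refine (h1 H rest frames ex e ret he hp).trans ?_
  intro v hv
  rcases hv with hh | hd
  · obtain ⟨k, hk⟩ := hh
    exact fromHead h2 hE H rest frames ex e ret k v hk
  · exact hE H rest frames ex e ret v hd

end digest_extensions

end Gif.Spec
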